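-- pv_equiv track=rewrite | github.com/Artuur-Oerlemans/adventOfCode2021 | src/day03/solution.py | co2_eliminator
-- ===== SOURCE A (Python) =====
-- def co2_eliminator(lines, place):
-- 	number1 = 0
-- 	result = list()
-- 	for line in lines:
-- 		if line[place] == '1':
-- 			number1 += 1
--
-- 	for line in lines:
-- 		if number1 < len(lines) - number1 and line[place] == '1':
-- 			result.append(line)
-- 		elif number1 >= len(lines) - number1 and line[place] == '0':
-- 			result.append(line)
-- 	return result
-- ===== SOURCE B (Python) =====
-- def co2_eliminator(lines, place):
-- 	ones = []
-- 	zeros = []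
-- 	for line in lines:
-- 		c = line[place]
-- 		if c == '1':
-- 			ones.append(line)
-- 		elif c == '0':
-- 			zeros.append(line)
-- 	return ones if len(ones) < len(lines) - len(ones) else zeros
-- ===== Notes on version B (the rewrite author's own statement) =====
-- stated objective: simpler
-- what changed: Single partitioning pass building the ones and zeros lists, then a length comparison selects one prebuilt list, replacing A's counting pass plus a second filtering pass that re-evaluates the majority test per line.
import Mathlib
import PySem

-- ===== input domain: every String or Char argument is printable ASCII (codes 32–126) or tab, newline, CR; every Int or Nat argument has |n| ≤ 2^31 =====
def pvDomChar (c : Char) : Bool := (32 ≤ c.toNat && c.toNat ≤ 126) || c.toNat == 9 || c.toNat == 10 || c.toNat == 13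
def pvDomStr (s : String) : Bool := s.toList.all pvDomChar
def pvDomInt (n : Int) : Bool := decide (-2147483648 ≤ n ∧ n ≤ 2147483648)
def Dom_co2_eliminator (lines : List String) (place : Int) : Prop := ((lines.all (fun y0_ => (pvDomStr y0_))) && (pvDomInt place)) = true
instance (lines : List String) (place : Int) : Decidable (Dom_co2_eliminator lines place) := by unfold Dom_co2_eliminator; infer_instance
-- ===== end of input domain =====

-- B replaces A's count-then-refilter double pass by one partitioning pass plus a length comparison (simpler decomposition, same cost).

-- ===== PORT A =====
def co2_eliminator (lines : List String) (place : Int) : List String :=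
  let number1 : Int := lines.foldl
    (fun n line => if PySem.Str.pyGet? line place = some '1' then n + 1 else n) 0
  lines.foldl
    (fun result line =>
      if number1 < (lines.length : Int) - number1 ∧ PySem.Str.pyGet? line place = some '1' then
        result ++ [line]
      else if (lines.length : Int) - number1 ≤ number1 ∧ PySem.Str.pyGet? line place = some '0' then
        result ++ [line]
      else result) []

-- ===== PORT B =====
def co2_eliminator_alt (lines : List String) (place : Int) : List String :=
  let p : List String × List String := lines.foldl
    (fun acc line =>
      if PySem.Str.pyGet? line place = some '1' then (acc.1 ++ [line], acc.2)
      else if PySem.Str.pyGet? line place = some '0' then (acc.1, acc.2 ++ [line])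
      else acc) ([], [])
  if (p.1.length : Int) < (lines.length : Int) - p.1.length then p.1 else p.2

-- ===== PRECONDITION & SPEC =====
-- Pre_ excludes exactly the inputs where Python's line[place] raises IndexError (A raises; so does B).
def Pre_co2_eliminator (lines : List String) (place : Int) : Prop :=
  ∀ line ∈ lines, (PySem.Str.pyGet? line place).isSome = true
instance (lines : List String) (place : Int) : Decidable (Pre_co2_eliminator lines place) := by
  unfold Pre_co2_eliminator; infer_instance
def pvWitness_co2_eliminator : List String × Int := (["10", "01", "11"], 0)

def Spec_co2_eliminator (lines : List String) (place : Int) (out : List String) : Prop := out = co2_eliminator_alt lines place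
instance (lines : List String) (place : Int) (out : List String) : Decidable (Spec_co2_eliminator lines place out) := by unfold Spec_co2_eliminator; infer_instance

-- ===== CLAIM (what is proved, stated in full; the proofs are below) =====
def Claim_equal_co2_eliminator : Prop := ∀ (lines : List String) (place : Int), Dom_co2_eliminator lines place → Pre_co2_eliminator lines place → Spec_co2_eliminator lines place (co2_eliminator lines place)

-- ===== LEMMAS AND PROOFS =====

-- A's first loop counts the lines whose char at `place` is '1'.
lemma pv_count_eq (g : String → Option Char) (lines : List String) (k : Int) :
    lines.foldl (fun n line => if g line = some '1' then n + 1 else n) k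
      = k + ((lines.filter (fun l => g l = some '1')).length : Int) := by
  induction lines generalizing k with
  | nil => simp
  | cons x xs ih =>
    by_cases h : g x = some '1' <;> simp [h, ih] <;> ring

-- A's second loop is a filter on '1' or on '0', depending on the fixed majority test.
lemma pv_loopA (g : String → Option Char) (c1 n : Int) (lines acc : List String) :
    lines.foldl
      (fun result line =>
        if c1 < n - c1 ∧ g line = some '1' then result ++ [line]
        else if n - c1 ≤ c1 ∧ g line = some '0' then result ++ [line]
        else result) acc
      = acc ++ (if c1 < n - c1 then lines.filter (fun l => g l = some '1')
                else lines.filter (fun l => g l = some '0')) := by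
  by_cases hc : c1 < n - c1
  · have hc' : ¬ (n - c1 ≤ c1) := by omega
    have hf : (fun (result : List String) line =>
        if c1 < n - c1 ∧ g line = some '1' then result ++ [line]
        else if n - c1 ≤ c1 ∧ g line = some '0' then result ++ [line]
        else result)
        = fun result line => if g line = some '1' then result ++ [line] else result := by
      funext r l; simp [hc, hc']
    rw [hf, PySem.List.foldl_append_ite_eq_filter]
    simp [hc]
  · have hc' : n - c1 ≤ c1 := by omega
    have hf : (fun (result : List String) line =>
        if c1 < n - c1 ∧ g line = some '1' then result ++ [line]
        else if n - c1 ≤ c1 ∧ g line = some '0' then result ++ [line]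
        else result)
        = fun result line => if g line = some '0' then result ++ [line] else result := by
      funext r l; simp [hc, hc']
    rw [hf, PySem.List.foldl_append_ite_eq_filter]
    simp [hc]

-- B's single loop partitions into the '1'-lines and the '0'-lines, in order.
lemma pv_loopB (g : String → Option Char) (lines : List String) (acc : List String × List String) :
    lines.foldl
      (fun acc line =>
        if g line = some '1' then (acc.1 ++ [line], acc.2)
        else if g line = some '0' then (acc.1, acc.2 ++ [line])
        else acc) acc
      = (acc.1 ++ lines.filter (fun l => g l = some '1'),
         acc.2 ++ lines.filter (fun l => g l = some '0')) := by
  induction lines generalizing acc with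
  | nil => simp
  | cons x xs ih =>
    by_cases h1 : g x = some '1'
    · simp [h1, ih]
    · by_cases h0 : g x = some '0' <;> simp [h1, h0, ih]

-- ===== VERDICT (by name: the statement is the Claim_ definition above) =====
theorem co2_eliminator_spec : Claim_equal_co2_eliminator := by
  intro lines place _ _
  unfold Spec_co2_eliminator co2_eliminator co2_eliminator_alt
  rw [pv_count_eq, pv_loopA, pv_loopB]
  simp
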